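-- pv_equiv track=rewrite | github.com/wolfy916/Algorithm | Algorithm/problems/pracitce.py | solution
-- ===== SOURCE A (Python) =====
-- from collections import deque
--
-- def solution(stones, k):
--     answer = 2*(10**8)
--     deq = deque([])
--     lenV = 0
--     for i, stone in enumerate(stones):
--         if lenV:
--             for j in range(lenV-1, -1, -1):
--                 if deq[j][1] < stone:
--                     deq.pop()
--                     lenV -= 1
--                 else:
--                     break
--         deq.append((i, stone))
--         lenV += 1
--         if deq[0][0] < i-k+1:
--             deq.popleft()
--             lenV -= 1
--         if i >= k-1:
--             answer = min(answer, deq[0][1])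
--     return answer
-- ===== SOURCE B (Python) =====
-- def solution(stones, k):
--     # min over all full k-windows of the window max; the 2*10**8 cap folds into the running min
--     answer = 2 * 10**8
--     for i in range(len(stones) - k + 1):
--         answer = min(answer, max(stones[i:i+k]))
--     return answer
-- ===== Notes on version B (the rewrite author's own statement) =====
-- stated objective: simpler
-- what changed: Replaces the index/value monotone deque maintenance with a direct scan: for each window start take max of the slice and fold it into the running min (with the 2*10**8 cap as the initial value).
-- outside the precondition, e.g. on solution([], 0): A returns 200000000, B raises ValueError; on solution([], -2): A returns 200000000, B raises ValueError
import Mathlib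
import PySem

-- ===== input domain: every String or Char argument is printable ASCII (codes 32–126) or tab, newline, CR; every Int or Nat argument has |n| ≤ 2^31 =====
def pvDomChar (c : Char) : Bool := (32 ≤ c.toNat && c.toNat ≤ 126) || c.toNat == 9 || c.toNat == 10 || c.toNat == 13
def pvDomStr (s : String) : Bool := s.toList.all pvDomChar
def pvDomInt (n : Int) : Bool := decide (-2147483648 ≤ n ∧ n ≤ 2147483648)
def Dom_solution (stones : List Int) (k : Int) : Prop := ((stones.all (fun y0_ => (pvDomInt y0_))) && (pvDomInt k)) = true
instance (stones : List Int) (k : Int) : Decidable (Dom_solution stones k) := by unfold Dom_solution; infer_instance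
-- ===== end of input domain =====

-- B replaces A's monotone deque with a direct min-of-window-maxes scan (objective: simpler; same return values).

-- ===== PORT A =====
-- Inner 'for j in range(lenV-1,-1,-1): if deq[j][1] < stone: deq.pop() else: break' loop of A:
-- pop from the right end of the deque while the last stone is < the incoming one (drop-from-the-right-while).
def aPop (deq : List (Int × Int)) (stone : Int) : List (Int × Int) :=
  (deq.reverse.dropWhile (fun p => decide (p.2 < stone))).reverse

-- A's enumerate-loop as structural recursion over the remaining stones; state = (i, answer, deq).
-- 'headD (0,0)' is only read on a nonempty deque (Python raises IndexError there; Pre_ gives 1 ≤ k, keeping it nonempty).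
def aLoop (k : Int) : List Int → Int → Int → List (Int × Int) → Int
  | [], _, answer, _ => answer
  | stone :: rest, i, answer, deq =>
    let deq2 := aPop deq stone ++ [(i, stone)]
    let deq3 := if (deq2.headD (0, 0)).1 < i - k + 1 then deq2.tail else deq2
    let answer' := if k - 1 ≤ i then min answer (deq3.headD (0, 0)).2 else answer
    aLoop k rest (i + 1) answer' deq3

def solution (stones : List Int) (k : Int) : Int :=
  aLoop k stones 0 (2 * 10 ^ 8) []

-- ===== PORT B =====
-- max(stones[i:i+k]): for i in the range and 1 ≤ k the slice is nonempty, so '.getD 0' is never read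
-- (Python's max would raise on an empty slice, which Pre_ excludes).
def solution_alt (stones : List Int) (k : Int) : Int :=
  (PySem.List.pyRange 0 ((stones.length : Int) - k + 1) 1).foldl
    (fun answer i =>
      min answer ((PySem.List.max? (PySem.List.slice stones (some i) (some (i + k))) (fun x => x)).getD 0))
    (2 * 10 ^ 8)

-- ===== PRECONDITION & SPEC =====
-- Pre_ excludes k ≤ 0: there A raises IndexError on every nonempty stones (the deque is emptied before
-- deq[0] is read), while on empty stones its loop never runs and it returns the 2*10**8 cap — a corner
-- B's natural empty-slice max cannot reproduce (it raises ValueError there).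
def Pre_solution (stones : List Int) (k : Int) : Prop := 1 ≤ k
instance (stones : List Int) (k : Int) : Decidable (Pre_solution stones k) := by unfold Pre_solution; infer_instance
def pvWitness_solution : List Int × Int := ([9, 4, 7, 1, 5], 3)

def Spec_solution (stones : List Int) (k : Int) (out : Int) : Prop := out = solution_alt stones k
instance (stones : List Int) (k : Int) (out : Int) : Decidable (Spec_solution stones k out) := by unfold Spec_solution; infer_instance

-- ===== CLAIM (what is proved, stated in full; the proofs are below) =====
def Claim_equal_solution : Prop := ∀ (stones : List Int) (k : Int), Dom_solution stones k → Pre_solution stones k → Spec_solution stones k (solution stones k)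

-- ===== LEMMAS AND PROOFS =====

lemma dropWhile_eq_filter_of_asc (s : Int) :
    ∀ (l : List (Int × Int)), l.Pairwise (fun a b => a.2 ≤ b.2) →
      l.dropWhile (fun p => decide (p.2 < s)) = l.filter (fun p => decide (¬ p.2 < s)) := by
  intro l hl
  induction l with
  | nil => rfl
  | cons a t ih =>
    rcases List.pairwise_cons.mp hl with ⟨ha, ht⟩
    by_cases h : a.2 < s
    · simp [h, ih ht]
    · have hall : ∀ p ∈ t, s ≤ p.2 := fun p hp => by have := ha p hp; omega
      have h2 : s ≤ a.2 := by omega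
      simp only [List.dropWhile_cons, List.filter_cons, h, decide_false,
        Bool.false_eq_true, if_false, not_false_eq_true, decide_true, if_true]
      rw [List.filter_eq_self.mpr (fun p hp => by simpa using hall p hp)]

-- the deque contents after processing the prefix 'pre': exactly the indices j inside the
-- current window with no later element exceeding pre[j], paired with their stones
def cand (pre : List Int) (k : Int) : List Nat :=
  (List.range pre.length).filter
    (fun (j : Nat) => decide ((pre.length : Int) - k ≤ (j : Int) ∧
      ∀ l ∈ List.range pre.length, j < l → pre.getD l 0 ≤ pre.getD j 0))
def dq (pre : List Int) (k : Int) : List (Int × Int) :=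
  (cand pre k).map (fun (j : Nat) => ((j : Int), pre.getD j 0))
lemma mem_cand {pre : List Int} {k : Int} {j : Nat} :
    j ∈ cand pre k ↔ j < pre.length ∧ (pre.length : Int) - k ≤ (j : Int) ∧
      ∀ l, j < l → l < pre.length → pre.getD l 0 ≤ pre.getD j 0 := by
  simp [cand, List.mem_filter, List.mem_range]
  tauto
lemma cand_pairwise (pre : List Int) (k : Int) : (cand pre k).Pairwise (· < ·) :=
  List.Pairwise.filter _ (List.pairwise_lt_range)
lemma dq_antitone (pre : List Int) (k : Int) :
    (dq pre k).Pairwise (fun a b => b.2 ≤ a.2) := by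
  unfold dq
  rw [List.pairwise_map]
  have := (List.Pairwise.and_mem.mp ((cand_pairwise pre k)))
  refine this.imp ?_
  rintro j1 j2 ⟨h1, h2, hlt⟩
  rcases mem_cand.mp h1 with ⟨_, _, hall⟩
  rcases mem_cand.mp h2 with ⟨hj2, _, _⟩
  exact hall j2 hlt hj2
lemma aPop_dq (pre : List Int) (k : Int) (s : Int) :
    aPop (dq pre k) s = (dq pre k).filter (fun p => decide (¬ p.2 < s)) := by
  unfold aPop
  rw [dropWhile_eq_filter_of_asc s _ (by
        rw [List.pairwise_reverse]; exact dq_antitone pre k),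
      ← List.filter_reverse, List.reverse_reverse]
lemma c1_eq (pre : List Int) (k : Int) (s : Int) :
    aPop (dq pre k) s
      = ((cand pre k).filter (fun (j : Nat) => decide (s ≤ pre.getD j 0))).map
          (fun (j : Nat) => ((j : Int), pre.getD j 0)) := by
  rw [aPop_dq]
  unfold dq
  rw [List.filter_map]
  congr 1
  apply List.filter_congr
  intro j _
  simp [not_lt]

lemma getD_snoc_lt {pre : List Int} {s : Int} {l : Nat} (h : l < pre.length) :
    (pre ++ [s]).getD l 0 = pre.getD l 0 := List.getD_append _ _ _ _ h

lemma getD_snoc_self (pre : List Int) (s : Int) :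
    (pre ++ [s]).getD pre.length 0 = s := by
  simp [List.getD]

lemma cand_snoc (pre : List Int) (k : Int) (s : Int) (hk : 1 ≤ k) :
    cand (pre ++ [s]) k
      = (((cand pre k).filter (fun (j : Nat) => decide (s ≤ pre.getD j 0))).filter
          (fun (j : Nat) => decide ((pre.length : Int) - k + 1 ≤ (j : Int)))) ++ [pre.length] := by
  unfold cand
  rw [List.filter_filter, List.filter_filter]
  have hlen : (pre ++ [s]).length = pre.length + 1 := by simp
  rw [hlen, List.range_succ, List.filter_append]
  congr 1
  · apply List.filter_congr
    intro j hj
    have hjm : j < pre.length := List.mem_range.mp hj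
    simp only [← Bool.decide_and, decide_eq_decide]
    constructor
    · rintro ⟨h1, h2⟩
      have h1' : (pre.length : Int) - k + 1 ≤ (j : Int) := by push_cast at h1 ⊢; omega
      have hs : s ≤ pre.getD j 0 := by
        have := h2 pre.length (List.mem_append_right _ (by simp)) hjm
        rwa [getD_snoc_self, getD_snoc_lt hjm] at this
      refine ⟨⟨h1', hs⟩, by omega, ?_⟩
      intro l hl hjl
      have hlm := List.mem_range.mp hl
      have := h2 l (List.mem_append_left _ hl) hjl
      rwa [getD_snoc_lt hlm, getD_snoc_lt hjm] at this
    · rintro ⟨⟨h1, hs⟩, h2, h3⟩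
      refine ⟨by push_cast at h1 ⊢; omega, ?_⟩
      intro l hl hjl
      rcases List.mem_append.mp hl with hm | hm
      · rw [getD_snoc_lt (List.mem_range.mp hm), getD_snoc_lt hjm]
        exact h3 l hm hjl
      · have : l = pre.length := by simpa using hm
        subst this
        rw [getD_snoc_self, getD_snoc_lt hjm]
        exact hs
  · simp
    refine ⟨by omega, ?_⟩
    intro l hl hgt
    exact absurd hgt (by rcases hl with h | h <;> omega)
lemma dq_snoc (pre : List Int) (k : Int) (s : Int) (hk : 1 ≤ k) :
    dq (pre ++ [s]) k
      = (((cand pre k).filter (fun (j : Nat) => decide (s ≤ pre.getD j 0))).filter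
          (fun (j : Nat) => decide ((pre.length : Int) - k + 1 ≤ (j : Int)))).map
          (fun (j : Nat) => ((j : Int), pre.getD j 0)) ++ [((pre.length : Int), s)] := by
  unfold dq
  rw [cand_snoc pre k s hk, List.map_append]
  congr 1
  · apply List.map_congr_left
    intro j hj
    have hjc : j ∈ cand pre k := (List.mem_filter.mp (List.mem_filter.mp hj).1).1
    have hjm : j < pre.length := (mem_cand.mp hjc).1
    rw [getD_snoc_lt hjm]
  · simp

lemma dq_step (pre : List Int) (s : Int) (k : Int) (hk : 1 ≤ k) :
    (if (((aPop (dq pre k) s ++ [((pre.length : Int), s)]).headD (0, 0)).1 < (pre.length : Int) - k + 1)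
      then (aPop (dq pre k) s ++ [((pre.length : Int), s)]).tail
      else (aPop (dq pre k) s ++ [((pre.length : Int), s)]))
    = dq (pre ++ [s]) k := by
  rw [c1_eq pre k s, dq_snoc pre k s hk]
  set c1 := (cand pre k).filter (fun (j : Nat) => decide (s ≤ pre.getD j 0)) with hc1
  have hpw : c1.Pairwise (· < ·) := List.Pairwise.filter _ (cand_pairwise pre k)
  cases hcc : c1 with
  | nil =>
    simp only [List.map_nil, List.nil_append, List.filter_nil, List.headD_cons]
    rw [if_neg (by omega)]
  | cons j0 t =>
    have hj0c : j0 ∈ cand pre k := by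
      have : j0 ∈ c1 := by rw [hcc]; exact List.mem_cons_self
      exact (List.mem_filter.mp this).1
    have hj0lo : (pre.length : Int) - k ≤ (j0 : Int) := (mem_cand.mp hj0c).2.1
    have htmem : ∀ j ∈ t, (pre.length : Int) - k + 1 ≤ (j : Int) := by
      intro j hj
      have hlt : j0 < j := (List.pairwise_cons.mp (hcc ▸ hpw)).1 j hj
      omega
    have htfilter : t.filter (fun (j : Nat) => decide ((pre.length : Int) - k + 1 ≤ (j : Int))) = t :=
      List.filter_eq_self.mpr (fun j hj => by simpa using htmem j hj)
    by_cases h : (j0 : Int) < (pre.length : Int) - k + 1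
    · simp only [List.map_cons, List.cons_append, List.headD_cons, if_pos h, List.tail_cons]
      rw [List.filter_cons_of_neg (by simpa using h), htfilter]
    · simp only [List.map_cons, List.cons_append, List.headD_cons, if_neg h]
      rw [List.filter_cons_of_pos (by simpa using h), htfilter]
      simp
lemma dq_head (pre : List Int) (k : Int) (hk : 1 ≤ k) (hm : k ≤ (pre.length : Int)) :
    ((dq pre k).headD (0, 0)).2
      = (PySem.List.max? (pre.drop (pre.length - k.toNat)) (fun x => x)).getD 0 := by
  have hkm : k.toNat ≤ pre.length := by omega
  have hk1 : 1 ≤ k.toNat := by omega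
  set w := pre.drop (pre.length - k.toNat) with hw
  have hwlen : w.length = k.toNat := by
    rw [hw, List.length_drop]; omega
  have hwne : w ≠ [] := by
    intro h; rw [h] at hwlen; simp at hwlen; omega
  cases hmx : PySem.List.max? w (fun x => x) with
  | none => exact absurd ((PySem.List.max?_eq_none_iff w (fun x => x)).mp hmx) hwne
  | some M =>
    have hMmem : M ∈ w := PySem.List.max?_mem hmx
    have hMmax : ∀ y ∈ w, y ≤ M := fun y hy => PySem.List.max?_isMax hmx y hy
    -- index of M in w, lifted to an index of pre
    obtain ⟨iw, hiw, hiwv⟩ := List.mem_iff_getElem.mp hMmem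
    have hjlt : pre.length - k.toNat + iw < pre.length := by omega
    have hjv : pre.getD (pre.length - k.toNat + iw) 0 = M := by
      rw [List.getD_eq_getElem _ _ hjlt, ← hiwv]
      simp [hw]
    -- every index of the window has its element in w
    have hwin : ∀ l, pre.length - k.toNat ≤ l → l < pre.length → pre.getD l 0 ∈ w := by
      intro l hlo hhi
      rw [List.getD_eq_getElem _ _ hhi]
      have hidx : l - (pre.length - k.toNat) < w.length := by omega
      refine List.mem_iff_getElem.mpr ⟨l - (pre.length - k.toNat), hidx, ?_⟩
      simp only [hw, List.getElem_drop]
      congr 1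
      omega
    have hjstar : (pre.length - k.toNat + iw) ∈ cand pre k := by
      refine mem_cand.mpr ⟨hjlt, by omega, ?_⟩
      intro l hjl hlm
      rw [hjv]
      exact hMmax _ (hwin l (by omega) hlm)
    cases hcc : cand pre k with
    | nil => rw [hcc] at hjstar; simp at hjstar
    | cons j0 t =>
      have hj0 : j0 ∈ cand pre k := by rw [hcc]; exact List.mem_cons_self
      rcases mem_cand.mp hj0 with ⟨hj0m, hj0lo, hj0all⟩
      have hle : pre.getD j0 0 ≤ M := hMmax _ (hwin j0 (by omega) hj0m)
      have hge : M ≤ pre.getD j0 0 := by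
        rcases List.mem_cons.mp (hcc ▸ hjstar) with heq | hmemt
        · rw [heq] at hjv; omega
        · have hlt : j0 < pre.length - k.toNat + iw :=
            (List.pairwise_cons.mp (hcc ▸ cand_pairwise pre k)).1 _ hmemt
          rw [← hjv]
          exact hj0all _ hlt hjlt
      unfold dq
      rw [hcc]
      simp only [List.map_cons, List.headD_cons, Option.getD_some]
      omega
def wnd (st : List Int) (k : Int) (i : Nat) : Int :=
  (PySem.List.max? ((st.take (i + 1)).drop (i + 1 - k.toNat)) (fun x => x)).getD 0

lemma aLoop_eq (st : List Int) (k : Int) (hk : 1 ≤ k) :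
    ∀ (rest pre : List Int) (answer : Int), st = pre ++ rest →
      aLoop k rest (pre.length : Int) answer (dq pre k)
      = (((List.range' pre.length rest.length).filter
            (fun (i : Nat) => decide (k - 1 ≤ (i : Int)))).map (wnd st k)).foldl min answer := by
  intro rest
  induction rest with
  | nil => intro pre answer h; simp [aLoop]
  | cons s rest' ih =>
    intro pre answer h
    simp only [aLoop]
    rw [dq_step pre s k hk]
    have hlen1 : ((pre ++ [s]).length : Int) = (pre.length : Int) + 1 := by simp
    have hihp : st = (pre ++ [s]) ++ rest' := by rw [h, List.append_assoc]; rfl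
    have hrw : List.range' pre.length (rest'.length + 1)
        = pre.length :: List.range' (pre.length + 1) rest'.length := by rw [List.range'_succ]
    by_cases hi : k - 1 ≤ (pre.length : Int)
    · have hhead : ((dq (pre ++ [s]) k).headD (0, 0)).2 = wnd st k pre.length := by
        rw [dq_head (pre ++ [s]) k hk (by simp; omega)]
        unfold wnd
        rw [hihp, List.take_left' (by simp)]
        simp
      rw [if_pos hi, hhead]
      have := ih (pre ++ [s]) (min answer (wnd st k pre.length)) hihp
      rw [hlen1] at this
      rw [this]
      rw [List.length_cons, hrw, List.filter_cons_of_pos (by simpa using hi),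
        List.map_cons, List.foldl_cons]
      simp
    · rw [if_neg hi]
      have := ih (pre ++ [s]) answer hihp
      rw [hlen1] at this
      rw [this]
      rw [List.length_cons, hrw, List.filter_cons_of_neg (by simpa using hi)]
      simp
lemma solution_eq_fold (st : List Int) (k : Int) (hk : 1 ≤ k) :
    solution st k
      = (((List.range' 0 st.length).filter
            (fun (i : Nat) => decide (k - 1 ≤ (i : Int)))).map (wnd st k)).foldl min (2 * 10 ^ 8) := by
  have := aLoop_eq st k hk st [] (2 * 10 ^ 8) rfl
  simpa [solution, dq, cand] using this

lemma alt_eq_fold (st : List Int) (k : Int) (hk : 1 ≤ k) :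
    solution_alt st k
      = (((List.range' 0 st.length).filter
            (fun (i : Nat) => decide (k - 1 ≤ (i : Int)))).map (wnd st k)).foldl min (2 * 10 ^ 8) := by
  unfold solution_alt
  rw [PySem.List.pyRange_one, List.foldl_map, ← List.foldl_map]
  by_cases hn : (st.length : Int) < k
  · have h1 : ((st.length : Int) - k + 1 - 0).toNat = 0 ∨ ((st.length : Int) - k + 1 - 0).toNat = 0 := by omega
    have hN : ((st.length : Int) - k + 1 - 0).toNat = 0 := by omega
    rw [hN]
    rw [List.filter_eq_nil_iff.mpr (by
      intro i hi
      have := List.mem_range'_1.mp hi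
      simp only [decide_eq_true_eq, not_le]
      omega)]
    simp
  · have hkn : k.toNat ≤ st.length := by omega
    have hk1 : 1 ≤ k.toNat := by omega
    have hN : ((st.length : Int) - k + 1 - 0).toNat = st.length - k.toNat + 1 := by omega
    rw [hN]
    have hsplit : List.range' 0 st.length
        = List.range' 0 (k.toNat - 1) ++ List.range' (k.toNat - 1) (st.length - k.toNat + 1) := by
      have h2 := @List.range'_append 0 (k.toNat - 1) (st.length - k.toNat + 1) 1
      simp only [one_mul, zero_add] at h2
      rw [h2]
      congr 1
      omega
    rw [hsplit, List.filter_append]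
    rw [List.filter_eq_nil_iff.mpr (by
      intro i hi
      have := List.mem_range'_1.mp hi
      simp only [decide_eq_true_eq, not_le]
      omega)]
    rw [List.filter_eq_self.mpr (by
      intro i hi
      have := List.mem_range'_1.mp hi
      simp only [decide_eq_true_eq]
      omega)]
    rw [List.nil_append, List.range'_eq_map_range, List.map_map]
    congr 1
    apply List.map_congr_left
    intro j hj
    have hkc : k = (k.toNat : Int) := by omega
    simp only [Function.comp_apply]
    unfold wnd
    rw [hkc, zero_add, PySem.List.slice_natCast_add st j k.toNat]
    simp only [Int.toNat_natCast]
    have harg : k.toNat - 1 + j + 1 = j + k.toNat := by omega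
    rw [harg]
    have harg2 : j + k.toNat - k.toNat = j := by omega
    rw [harg2]
    rw [List.drop_take]
    have h3 : j + k.toNat - j = k.toNat := by omega
    rw [h3]

-- ===== VERDICT (by name: the statement is the Claim_ definition above) =====
theorem solution_spec : Claim_equal_solution := by
  intro stones k _ hk
  unfold Spec_solution
  rw [solution_eq_fold stones k hk, alt_eq_fold stones k hk]
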